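-- pv_equiv track=rewrite | github.com/abalas/daw2-python | BoletinEjercicios4/Ej3FSucessionDeFibonacciHastaNumeroIntroducido.py | calcularSucesionDeFibonacci
-- ===== SOURCE A (Python) =====
-- def calcularSucesionDeFibonacci(numero):
--     cadena = ""
--     if(numero==1):
--         cadena = "0"
--     if(numero==2):
--         cadena = "0,1"
--     if(numero > 2):
--         cadena = "0,1"
--         a=0
--         b=1
--         c=1
--         aux = c
--         for i in range(0,numero-2):
--             aux = c
--             a = b
--             b=c
--             c = a + b
--             cadena += f",{aux}"
--
--     return cadena
-- ===== SOURCE B (Python) =====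
-- def calcularSucesionDeFibonacci(numero):
--     def fib_pair(k):
--         # fast doubling: returns (F(k), F(k+1))
--         if k == 0:
--             return (0, 1)
--         f, g = fib_pair(k // 2)
--         a = f * (2 * g - f)
--         b = f * f + g * g
--         if k % 2 == 0:
--             return (a, b)
--         return (b, a + b)
--     return ",".join(str(fib_pair(k)[0]) for k in range(numero))
-- ===== Notes on version B (the rewrite author's own statement) =====
-- stated objective: alternative
-- what changed: Each Fibonacci term is computed independently by recursive fast doubling (F(2k)=F(k)(2F(k+1)-F(k)), F(2k+1)=F(k)^2+F(k+1)^2) and the terms are joined with ',', instead of A's special-case branches plus an iterative three-variable loop concatenating onto a string.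
import Mathlib
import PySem

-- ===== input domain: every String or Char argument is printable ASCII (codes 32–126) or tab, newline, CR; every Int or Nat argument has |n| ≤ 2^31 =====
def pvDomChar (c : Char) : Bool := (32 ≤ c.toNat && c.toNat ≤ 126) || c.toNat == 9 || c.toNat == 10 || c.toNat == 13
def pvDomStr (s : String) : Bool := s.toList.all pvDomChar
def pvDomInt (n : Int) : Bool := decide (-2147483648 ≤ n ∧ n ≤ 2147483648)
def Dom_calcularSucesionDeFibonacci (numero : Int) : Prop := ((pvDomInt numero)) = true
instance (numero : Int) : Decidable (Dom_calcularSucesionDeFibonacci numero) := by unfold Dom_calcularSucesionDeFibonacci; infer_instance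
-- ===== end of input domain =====

-- B: computes each Fibonacci term independently by recursive fast doubling and joins
-- them with ',', instead of A's n=1/n=2 branches plus an offset loop concatenating onto a string.


-- ===== PORT A =====
-- one iteration of A's loop body: state (cadena, a, b, c, aux)
def pvStepA (s : String × Int × Int × Int × Int) : String × Int × Int × Int × Int :=
  match s with
  | (cadena, _a, b, c, _aux) =>
    let aux := c
    let a' := b
    let b' := c
    let c' := a' + b'
    (cadena ++ "," ++ PySem.Int.toStr aux, a', b', c', aux)

def calcularSucesionDeFibonacci (numero : Int) : String :=
  let cadena : String := ""
  let cadena := if numero = 1 then "0" else cadena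
  let cadena := if numero = 2 then "0,1" else cadena
  if numero > 2 then
    ((PySem.List.pyRange 0 (numero - 2) 1).foldl (fun s _ => pvStepA s) ("0,1", 0, 1, 1, 1)).1
  else
    cadena

-- ===== PORT B =====
-- fib_pair(k): fast doubling, returns (F(k), F(k+1)).  Python's k is a nonnegative int
-- here (it comes from range(numero)), so Nat recursion on k is exact.
def pvFibPair : Nat → Int × Int
  | 0 => (0, 1)
  | k + 1 =>
    let p := pvFibPair ((k + 1) / 2)
    let f := p.1
    let g := p.2
    let a := f * (2 * g - f)
    let b := f * f + g * g
    if (k + 1) % 2 == 0 then (a, b) else (b, a + b)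
decreasing_by omega

-- ','.join(str(fib_pair(k)[0]) for k in range(numero)); range elements are ≥ 0 so
-- .toNat is exact here.
def calcularSucesionDeFibonacci_alt (numero : Int) : String :=
  PySem.Str.join ","
    ((PySem.List.pyRange 0 numero 1).map (fun k => PySem.Int.toStr (pvFibPair k.toNat).1))

-- ===== PRECONDITION & SPEC =====
def Spec_calcularSucesionDeFibonacci (numero : Int) (out : String) : Prop := out = calcularSucesionDeFibonacci_alt numero
instance (numero : Int) (out : String) : Decidable (Spec_calcularSucesionDeFibonacci numero out) := by unfold Spec_calcularSucesionDeFibonacci; infer_instance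

-- ===== CLAIM (what is proved, stated in full; the proofs are below) =====
def Claim_equal_calcularSucesionDeFibonacci : Prop := ∀ (numero : Int), Dom_calcularSucesionDeFibonacci numero → Spec_calcularSucesionDeFibonacci numero (calcularSucesionDeFibonacci numero)

-- ===== LEMMAS AND PROOFS =====

-- the first n Fibonacci numbers as strings
def pvStrs (n : Nat) : List String := (List.range n).map (fun k => PySem.Int.toStr (Nat.fib k : Int))

theorem pvFibPair_eq (k : Nat) : pvFibPair k = ((Nat.fib k : Int), (Nat.fib (k + 1) : Int)) := by
  induction k using Nat.strong_induction_on with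
  | _ k ih =>
    match k with
    | 0 => simp [pvFibPair]
    | k + 1 =>
      rw [pvFibPair]
      rw [ih ((k + 1) / 2) (by omega)]
      have hle : Nat.fib ((k + 1) / 2) ≤ 2 * Nat.fib ((k + 1) / 2 + 1) := by
        have := @Nat.fib_le_fib_succ ((k + 1) / 2); omega
      have hdbl : ((Nat.fib ((k + 1) / 2) : Int)) * (2 * (Nat.fib ((k + 1) / 2 + 1) : Int) - (Nat.fib ((k + 1) / 2) : Int))
          = (Nat.fib (2 * ((k + 1) / 2)) : Int) := by
        rw [Nat.fib_two_mul]
        push_cast [Nat.cast_sub hle]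
        ring
      have hsq : ((Nat.fib ((k + 1) / 2) : Int)) * (Nat.fib ((k + 1) / 2) : Int)
            + (Nat.fib ((k + 1) / 2 + 1) : Int) * (Nat.fib ((k + 1) / 2 + 1) : Int)
          = (Nat.fib (2 * ((k + 1) / 2) + 1) : Int) := by
        rw [Nat.fib_two_mul_add_one]
        push_cast
        ring
      rcases Nat.even_or_odd (k + 1) with he | ho
      · have h2 : 2 * ((k + 1) / 2) = k + 1 := by
          rcases he with ⟨m, hm⟩; omega
        have hm : (k + 1) % 2 = 0 := by omega
        simp only [hm]
        rw [hdbl, hsq, h2]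
        rfl
      · have h2 : 2 * ((k + 1) / 2) = k := by
          rcases ho with ⟨m, hm⟩; omega
        have hm : ¬ ((k + 1) % 2 = 0) := by omega
        rw [hdbl, hsq, h2]
        simp only [beq_iff_eq, if_neg hm, Prod.mk.injEq]
        refine ⟨by trivial, ?_⟩
        show ((Nat.fib k : Int)) + (Nat.fib (k + 1) : Int) = (Nat.fib (k + 2) : Int)
        exact_mod_cast (Nat.fib_add_two (n := k)).symm

theorem pvFoldlConst {α β : Type} (g : α → α) (l : List β) (init : α) :
    l.foldl (fun s _ => g s) init = g^[l.length] init := by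
  induction l generalizing init with
  | nil => rfl
  | cons x xs ih => simp [List.foldl, ih, Function.iterate_succ_apply]

theorem pvStrs_succ (n : Nat) : pvStrs (n + 1) = pvStrs n ++ [PySem.Int.toStr (Nat.fib n : Int)] := by
  simp [pvStrs, List.range_succ]

theorem pvJoinSnoc (sep x : List Char) (l : List (List Char)) (h : l ≠ []) :
    PySem.Chars.join sep (l ++ [x]) = PySem.Chars.join sep l ++ sep ++ x := by
  induction l with
  | nil => exact absurd rfl h
  | cons p rest ih =>
    cases rest with
    | nil => simp [PySem.Chars.join_singleton, PySem.Chars.join_cons_cons]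
    | cons q rs =>
      have ih' := ih (by simp)
      simp only [List.cons_append] at ih' ⊢
      rw [PySem.Chars.join_cons_cons, ih', PySem.Chars.join_cons_cons]
      simp

theorem pvJoinStrsSucc (n : Nat) (h : 1 ≤ n) :
    PySem.Str.join "," (pvStrs (n + 1)) =
      PySem.Str.join "," (pvStrs n) ++ "," ++ PySem.Int.toStr (Nat.fib n : Int) := by
  apply String.toList_injective
  rw [pvStrs_succ]
  simp only [String.toList_append, PySem.Str.toList_join, List.map_append, List.map_cons,
    List.map_nil]
  rw [pvJoinSnoc]
  simp [pvStrs]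
  omega

theorem pvAiter (k : Nat) :
    pvStepA^[k] ("0,1", 0, 1, 1, 1) =
      (PySem.Str.join "," (pvStrs (k + 2)), (Nat.fib k : Int), (Nat.fib (k + 1) : Int),
        (Nat.fib (k + 2) : Int), (Nat.fib (k + 1) : Int)) := by
  induction k with
  | zero =>
    have : PySem.Str.join "," (pvStrs 2) = "0,1" := by decide
    simp [this, Nat.fib]
  | succ k ih =>
    rw [Function.iterate_succ_apply', ih]
    show (PySem.Str.join "," (pvStrs (k + 2)) ++ "," ++ PySem.Int.toStr (Nat.fib (k + 2) : Int),
        (Nat.fib (k + 1) : Int), (Nat.fib (k + 2) : Int),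
        (Nat.fib (k + 1) : Int) + (Nat.fib (k + 2) : Int), (Nat.fib (k + 2) : Int)) = _
    rw [← pvJoinStrsSucc (k + 2) (by omega)]
    have h3 : (Nat.fib (k + 1) : Int) + (Nat.fib (k + 2) : Int) = (Nat.fib (k + 3) : Int) := by
      exact_mod_cast (Nat.fib_add_two (n := k + 1)).symm
    rw [h3]

theorem pvBmap (n : Nat) :
    (PySem.List.pyRange 0 (n : Int) 1).map (fun k => PySem.Int.toStr (pvFibPair k.toNat).1)
      = pvStrs n := by
  induction n with
  | zero => simp [PySem.List.pyRange_one_eq_nil, pvStrs]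
  | succ n ih =>
    have h : ((n : Int) + 1) = ((n + 1 : Nat) : Int) := by push_cast; ring
    rw [pvStrs_succ, ← ih]
    rw [show ((n + 1 : Nat) : Int) = (n : Int) + 1 by push_cast; ring]
    rw [PySem.List.pyRange_one_succ_right (by positivity), List.map_append]
    simp [pvFibPair_eq]

-- ===== VERDICT (by name: the statement is the Claim_ definition above) =====
theorem calcularSucesionDeFibonacci_spec : Claim_equal_calcularSucesionDeFibonacci := by
  intro numero _
  show calcularSucesionDeFibonacci numero = calcularSucesionDeFibonacci_alt numero
  rcases lt_trichotomy numero 1 with h | h | h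
  · -- numero ≤ 0 : both empty
    rw [calcularSucesionDeFibonacci, calcularSucesionDeFibonacci_alt,
      PySem.List.pyRange_one_eq_nil (a := 0) (b := numero) (by omega)]
    rw [if_neg (by omega : ¬ numero > 2), if_neg (by omega : ¬ numero = 2),
      if_neg (by omega : ¬ numero = 1)]
    rfl
  · subst h
    rw [calcularSucesionDeFibonacci, calcularSucesionDeFibonacci_alt]
    have hb := pvBmap 1
    norm_num at hb
    rw [hb]
    decide
  · rcases lt_trichotomy numero 2 with h2 | h2 | h2
    · exact ((by omega : False)).elim
    · subst h2
      rw [calcularSucesionDeFibonacci, calcularSucesionDeFibonacci_alt]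
      have hb := pvBmap 2
      norm_num at hb
      rw [hb]
      decide
    · -- numero > 2
      obtain ⟨n, rfl⟩ : ∃ n : Nat, numero = (n : Int) :=
        ⟨numero.toNat, (Int.toNat_of_nonneg (by omega)).symm⟩
      have hn : 3 ≤ n := by exact_mod_cast h2
      rw [calcularSucesionDeFibonacci, calcularSucesionDeFibonacci_alt]
      rw [if_pos (by exact_mod_cast h2)]
      rw [pvFoldlConst, PySem.List.length_pyRange_one, pvBmap]
      have e1 : ((n : Int) - 2 - 0).toNat = n - 2 := by omega
      rw [e1, pvAiter]
      have : n - 2 + 2 = n := by omega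
      rw [this]
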